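-- pv_equiv track=rewrite | github.com/HuDunYu/031902106 | function.py | count_keyword
-- ===== SOURCE A (Python) =====
-- keyword = [
--     'auto', 'break', 'case', 'char', 'const', 'continue', 'default', 'do',
--     'double', 'else', 'enum', 'extern', 'float', 'for', 'goto', 'if',
--     'int', 'long', 'register', 'return', 'short', 'signed', 'sizeof', 'static',
--     'struct', 'switch', 'typedef', 'union', 'unsigned', 'void', 'volatile', 'while'
-- ]
--
-- def count_keyword(lines):
--     total_num = 0
--     for line in lines:
--         str = line.split(' ')
--         for i in str:
--             for j in keyword:
--                 if i == j:
--                     total_num += 1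
--                     break
--     return total_num
-- ===== SOURCE B (Python) =====
-- keyword = [
--     'auto', 'break', 'case', 'char', 'const', 'continue', 'default', 'do',
--     'double', 'else', 'enum', 'extern', 'float', 'for', 'goto', 'if',
--     'int', 'long', 'register', 'return', 'short', 'signed', 'sizeof', 'static',
--     'struct', 'switch', 'typedef', 'union', 'unsigned', 'void', 'volatile', 'while'
-- ]
--
-- def count_keyword(lines):
--     counts = {}
--     for line in lines:
--         for tok in line.split(' '):
--             counts[tok] = counts.get(tok, 0) + 1
--     return sum(counts.get(k, 0) for k in keyword)
-- ===== Notes on version B (the rewrite author's own statement) =====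
-- stated objective: faster
-- what changed: B tallies every token once into a dict (token -> count) and then sums the counts of the 32 keywords, replacing A's per-token inner scan over the keyword list with a tally-then-lookup-by-keyword pass.
import Mathlib
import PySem

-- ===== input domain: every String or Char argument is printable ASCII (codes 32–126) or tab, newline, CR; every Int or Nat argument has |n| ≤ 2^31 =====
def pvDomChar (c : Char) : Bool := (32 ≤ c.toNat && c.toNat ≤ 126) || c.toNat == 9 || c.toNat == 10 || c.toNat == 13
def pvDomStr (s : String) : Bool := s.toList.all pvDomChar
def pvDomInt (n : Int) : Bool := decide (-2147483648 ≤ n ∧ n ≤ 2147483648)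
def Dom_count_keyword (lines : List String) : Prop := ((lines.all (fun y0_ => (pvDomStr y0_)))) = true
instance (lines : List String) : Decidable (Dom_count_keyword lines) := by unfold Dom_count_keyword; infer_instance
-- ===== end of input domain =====

-- B tallies every token once into a dict and then sums the 32 keywords' counts (alternative pass shape, same cost class).

-- the module-level keyword list shared by both programs
def kwList : List String :=
  ["auto", "break", "case", "char", "const", "continue", "default", "do",
   "double", "else", "enum", "extern", "float", "for", "goto", "if",
   "int", "long", "register", "return", "short", "signed", "sizeof", "static",
   "struct", "switch", "typedef", "union", "unsigned", "void", "volatile", "while"]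

-- ===== PORT A =====
-- A's innermost 'for j in keyword: if i == j: total += 1; break' loop
def scanKw (tot : Int) (i : String) : List String → Int
  | [] => tot
  | j :: rest => if i == j then tot + 1 else scanKw tot i rest

def count_keyword (lines : List String) : Int :=
  lines.foldl
    (fun tot line =>
      (((PySem.Str.split? line " ").getD [])).foldl (fun t i => scanKw t i kwList) tot)
    0

-- ===== PORT B =====
def count_keyword_alt (lines : List String) : Int :=
  let counts : PySem.Dict String Int :=
    lines.foldl
      (fun d line =>
        (((PySem.Str.split? line " ").getD [])).foldl (fun d tok => d.insert tok (d.getD tok 0 + 1)) d)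
      PySem.Dict.empty
  (kwList.map (fun k => counts.getD k 0)).sum

-- ===== PRECONDITION & SPEC =====
def Spec_count_keyword (lines : List String) (out : Int) : Prop := out = count_keyword_alt lines
instance (lines : List String) (out : Int) : Decidable (Spec_count_keyword lines out) := by unfold Spec_count_keyword; infer_instance

-- ===== CLAIM (what is proved, stated in full; the proofs are below) =====
def Claim_equal_count_keyword : Prop := ∀ (lines : List String), Dom_count_keyword lines → Spec_count_keyword lines (count_keyword lines)

-- ===== LEMMAS AND PROOFS =====

-- all tokens of all lines, in order
def allToks (lines : List String) : List String :=
  lines.flatMap (fun line => ((PySem.Str.split? line " ").getD []))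

theorem scanKw_eq (i : String) (l : List String) (tot : Int) :
    scanKw tot i l = if i ∈ l then tot + 1 else tot := by
  induction l with
  | nil => simp [scanKw]
  | cons j rest ih =>
    simp only [scanKw, ih, List.mem_cons, beq_iff_eq]
    by_cases h : i = j <;> simp [h]

theorem foldl_scanKw (toks : List String) (t0 : Int) :
    toks.foldl (fun t i => scanKw t i kwList) t0
      = t0 + ((toks.countP (fun i => decide (i ∈ kwList))) : Int) := by
  induction toks generalizing t0 with
  | nil => simp
  | cons i rest ih =>
    rw [List.foldl_cons, scanKw_eq, List.countP_cons]
    by_cases h : i ∈ kwList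
    · rw [if_pos h, ih]; simp [h]; ring
    · rw [if_neg h, ih]; simp [h]

theorem count_keyword_eq_countP (lines : List String) :
    count_keyword lines = ((allToks lines).countP (fun i => decide (i ∈ kwList)) : Int) := by
  unfold count_keyword allToks
  suffices h : ∀ (ls : List String) (t0 : Int),
      ls.foldl (fun tot line =>
        (((PySem.Str.split? line " ").getD [])).foldl (fun t i => scanKw t i kwList) tot) t0
      = t0 + ((ls.flatMap (fun line => ((PySem.Str.split? line " ").getD []))).countP
          (fun i => decide (i ∈ kwList)) : Int) by
    simpa using h lines 0
  intro ls
  induction ls with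
  | nil => simp
  | cons line rest ih =>
    intro t0
    rw [List.foldl_cons, foldl_scanKw, ih, List.flatMap_cons, List.countP_append]
    push_cast; ring

theorem getD_tally (lines : List String) (d : PySem.Dict String Int) (k : String) :
    (lines.foldl
      (fun d line =>
        (((PySem.Str.split? line " ").getD [])).foldl (fun d tok => d.insert tok (d.getD tok 0 + 1)) d)
      d).getD k 0 = d.getD k 0 + ((allToks lines).count k : Int) := by
  induction lines generalizing d with
  | nil => simp [allToks]
  | cons line rest ih =>
    rw [List.foldl_cons, ih, PySem.Dict.getD_foldl_insert_add_one]
    simp only [allToks, List.flatMap_cons, List.count_append]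
    push_cast; ring

theorem sum_counts (kws : List String) (hnd : kws.Nodup) (toks : List String) :
    (kws.map (fun k => (toks.count k : Int))).sum
      = (toks.countP (fun i => decide (i ∈ kws)) : Int) := by
  induction toks with
  | nil => simp
  | cons t rest ih =>
    have hstep : (kws.map (fun k => ((t :: rest).count k : Int))).sum
        = (kws.map (fun k => (rest.count k : Int))).sum
          + (kws.map (fun k => if t = k then (1 : Int) else 0)).sum := by
      rw [← List.sum_map_add]
      refine congrArg List.sum (List.map_congr_left ?_)
      intro k _
      by_cases h : t = k <;> simp [h]
    have hind : (kws.map (fun k => if t = k then (1 : Int) else 0)).sum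
        = if t ∈ kws then (1 : Int) else 0 := by
      clear hstep ih
      induction kws with
      | nil => simp
      | cons a as ih2 =>
        have hnd' : as.Nodup := hnd.of_cons
        by_cases h : t = a
        · subst h
          have : t ∉ as := (List.nodup_cons.mp hnd).1
          have hz : (as.map (fun k => if t = k then (1 : Int) else 0)).sum = 0 := by
            apply List.sum_eq_zero
            intro x hx
            simp only [List.mem_map] at hx
            obtain ⟨k, hk, rfl⟩ := hx
            have : t ≠ k := fun he => this (he ▸ hk)
            simp [this]
          simp [hz]
        · simp only [List.map_cons, List.sum_cons, if_neg h, zero_add, List.mem_cons]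
          rw [ih2 hnd']
          simp [h]
    rw [hstep, ih, List.countP_cons, hind]
    by_cases h : t ∈ kws <;> simp [h]

-- ===== VERDICT (by name: the statement is the Claim_ definition above) =====
theorem count_keyword_spec : Claim_equal_count_keyword := by
  intro lines _
  unfold Spec_count_keyword count_keyword_alt
  simp only [getD_tally, PySem.Dict.getD_empty, zero_add]
  rw [count_keyword_eq_countP, ← sum_counts kwList (by decide) (allToks lines)]
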